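-- pv_equiv track=rewrite | github.com/dhanwalkarjay/openenv-code-review | env/policy.py | _force_code_mutation
-- ===== SOURCE A (Python) =====
-- def _force_code_mutation(code: str) -> str:
--     """Apply a deterministic edit so each action explores a new candidate."""
--     lines = code.splitlines()
--     if not lines:
--         return "# mutated\n"
--
--     for idx, line in enumerate(lines):
--         if line.strip().startswith("for ") and " in " in line and "sorted(" not in line:
--             lines[idx] = line.replace(" in ", " in sorted(", 1)
--             if lines[idx].rstrip().endswith(":"):
--                 lines[idx] = lines[idx].rstrip()[:-1] + ", reverse=True):"
--             return "\n".join(lines).strip() + "\n"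
--
--     for idx, line in enumerate(lines):
--         if "return " in line and " or " not in line:
--             indent = line[: len(line) - len(line.lstrip())]
--             expression = line.strip()[7:]
--             lines[idx] = f"{indent}__mutated_result = {expression}"
--             lines.insert(idx + 1, f"{indent}return __mutated_result")
--             return "\n".join(lines).strip() + "\n"
--
--     return "\n".join(lines).strip() + "\n# mutated\n"
-- ===== SOURCE B (Python) =====
-- def _force_code_mutation(code: str) -> str:
--     """Apply a deterministic edit so each action explores a new candidate."""
--     lines = code.splitlines()
--     if not lines:
--         return "# mutated\n"
--
--     for_hit = None
--     ret_hit = None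
--     for idx, line in enumerate(lines):
--         if line.strip().startswith("for ") and " in " in line and "sorted(" not in line:
--             for_hit = (idx, line)
--             break  # the for-loop edit always wins, no need to scan further
--         if ret_hit is None and "return " in line and " or " not in line:
--             ret_hit = (idx, line)
--
--     if for_hit is not None:
--         idx, line = for_hit
--         new = line.replace(" in ", " in sorted(", 1)
--         if new.rstrip().endswith(":"):
--             new = new.rstrip()[:-1] + ", reverse=True):"
--         lines[idx] = new
--     elif ret_hit is not None:
--         idx, line = ret_hit
--         indent = line[: len(line) - len(line.lstrip())]
--         expression = line.strip()[7:]
--         lines[idx] = f"{indent}__mutated_result = {expression}"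
--         lines.insert(idx + 1, f"{indent}return __mutated_result")
--     else:
--         return "\n".join(lines).strip() + "\n# mutated\n"
--     return "\n".join(lines).strip() + "\n"
-- ===== Notes on version B (the rewrite author's own statement) =====
-- stated objective: alternative
-- what changed: A rescans the line list in two separate full enumerate loops (for-edit pass, then return-edit pass); B makes a single pass that records the first for-candidate (breaking there, since it wins) and the first return-candidate, then applies the chosen edit after the loop.
import Mathlib
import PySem

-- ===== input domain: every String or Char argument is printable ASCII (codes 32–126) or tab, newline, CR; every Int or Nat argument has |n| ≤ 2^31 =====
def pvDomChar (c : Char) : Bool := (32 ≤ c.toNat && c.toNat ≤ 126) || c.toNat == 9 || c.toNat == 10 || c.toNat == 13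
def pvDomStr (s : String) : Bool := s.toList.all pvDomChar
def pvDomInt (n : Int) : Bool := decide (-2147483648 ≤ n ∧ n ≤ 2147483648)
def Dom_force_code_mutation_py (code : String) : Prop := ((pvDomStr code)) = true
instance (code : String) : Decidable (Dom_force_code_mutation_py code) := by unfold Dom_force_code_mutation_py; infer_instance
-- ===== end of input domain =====

-- B replaces A's two separate enumerate scans by a single pass recording the first
-- for-candidate (breaking there) and the first return-candidate, editing afterwards (alternative decomposition).


-- ===== PORT A =====
-- shared leaf helpers: the line tests and the three line edits, identical expressions in Source A and Source B

-- line.strip().startswith("for ") and " in " in line and "sorted(" not in line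
def pvCondFor (l : List Char) : Bool :=
  PySem.Chars.startswith (PySem.Chars.strip l) "for ".toList &&
  PySem.Chars.isIn " in ".toList l && !(PySem.Chars.isIn "sorted(".toList l)

-- "return " in line and " or " not in line
def pvCondRet (l : List Char) : Bool :=
  PySem.Chars.isIn "return ".toList l && !(PySem.Chars.isIn " or ".toList l)

-- s.replace(old, new, 1): replace the FIRST occurrence (exact for nonempty old, as used here)
def pvReplaceFirst (s old new : List Char) : List Char :=
  let i := PySem.Chars.find s old
  if i = -1 then s else s.take i.toNat ++ new ++ s.drop (i.toNat + old.length)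

-- line.replace(" in ", " in sorted(", 1), then the rstrip()[:-1] + ", reverse=True):" fix-up
def pvForEdit (l : List Char) : List Char :=
  let n := pvReplaceFirst l " in ".toList " in sorted(".toList
  if PySem.Chars.endswith (PySem.Chars.rstrip n) ":".toList then
    PySem.List.slice (PySem.Chars.rstrip n) none (some (-1)) ++ ", reverse=True):".toList
  else n

-- indent = line[: len(line) - len(line.lstrip())]
def pvIndent (l : List Char) : List Char :=
  PySem.List.slice l none (some ((l.length : Int) - ((PySem.Chars.lstrip l).length : Int)))

-- f"{indent}__mutated_result = {line.strip()[7:]}"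
def pvRetEdit1 (l : List Char) : List Char :=
  pvIndent l ++ "__mutated_result = ".toList ++ PySem.List.slice (PySem.Chars.strip l) (some 7) none

-- f"{indent}return __mutated_result"
def pvRetEdit2 (l : List Char) : List Char :=
  pvIndent l ++ "return __mutated_result".toList

-- "\n".join(lines).strip() + "\n"
def pvFinish (ls : List (List Char)) : List Char :=
  PySem.Chars.strip (PySem.Chars.join ['\n'] ls) ++ ['\n']

-- lines[idx] = edited; "\n".join(lines).strip() + "\n"
def pvApplyFor (all : List (List Char)) (idx : Nat) (l : List Char) : List Char :=
  pvFinish (all.set idx (pvForEdit l))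

-- lines[idx] = assignment; lines.insert(idx+1, return line); join/strip
def pvApplyRet (all : List (List Char)) (idx : Nat) (l : List Char) : List Char :=
  pvFinish (PySem.List.insert (all.set idx (pvRetEdit1 l)) ((idx : Int) + 1) (pvRetEdit2 l))

-- A's first loop: for idx, line in enumerate(lines): if <for-cond>: edit; return …
def pvLoopFor (all : List (List Char)) : Nat → List (List Char) → Option (List Char)
  | _, [] => none
  | i, l :: rest => if pvCondFor l then some (pvApplyFor all i l) else pvLoopFor all (i+1) rest

-- A's second loop: for idx, line in enumerate(lines): if <ret-cond>: edit; return …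
def pvLoopRet (all : List (List Char)) : Nat → List (List Char) → Option (List Char)
  | _, [] => none
  | i, l :: rest => if pvCondRet l then some (pvApplyRet all i l) else pvLoopRet all (i+1) rest

def force_code_mutation_py (code : String) : String :=
  let lines := PySem.Chars.splitlines code.toList
  if lines = [] then "# mutated\n"
  else
    match pvLoopFor lines 0 lines with
    | some s => String.ofList s
    | none =>
      match pvLoopRet lines 0 lines with
      | some s => String.ofList s
      | none => String.ofList (PySem.Chars.strip (PySem.Chars.join ['\n'] lines) ++ "\n# mutated\n".toList)

-- ===== PORT B =====
-- the single pass of Source B: record (idx, line) of the first for-candidate (break) and first ret-candidate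
def pvScan : List (List Char) → Nat → Option (Nat × List Char) → Option (Nat × List Char) →
    Option (Nat × List Char) × Option (Nat × List Char)
  | [], _, fh, rh => (fh, rh)
  | l :: rest, i, fh, rh =>
    if pvCondFor l then (some (i, l), rh)
    else pvScan rest (i + 1) fh (if rh.isNone && pvCondRet l then some (i, l) else rh)

def force_code_mutation_py_alt (code : String) : String :=
  let lines := PySem.Chars.splitlines code.toList
  if lines = [] then "# mutated\n"
  else
    let hits := pvScan lines 0 none none
    match hits.1 with
    | some (i, l) => String.ofList (pvApplyFor lines i l)
    | none =>
      match hits.2 with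
      | some (i, l) => String.ofList (pvApplyRet lines i l)
      | none => String.ofList (PySem.Chars.strip (PySem.Chars.join ['\n'] lines) ++ "\n# mutated\n".toList)

-- ===== PRECONDITION & SPEC =====
def Spec_force_code_mutation_py (code : String) (out : String) : Prop := out = force_code_mutation_py_alt code
instance (code : String) (out : String) : Decidable (Spec_force_code_mutation_py code out) := by unfold Spec_force_code_mutation_py; infer_instance

-- ===== CLAIM (what is proved, stated in full; the proofs are below) =====
def Claim_equal_force_code_mutation_py : Prop := ∀ (code : String), Dom_force_code_mutation_py code → Spec_force_code_mutation_py code (force_code_mutation_py code)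

-- ===== LEMMAS AND PROOFS =====

-- first (idx, line) from position i satisfying p
def pvFirst (p : List Char → Bool) : List (List Char) → Nat → Option (Nat × List Char)
  | [], _ => none
  | l :: rest, i => if p l then some (i, l) else pvFirst p rest (i + 1)

theorem pvLoopFor_eq (all : List (List Char)) : ∀ (xs : List (List Char)) (i : Nat),
    pvLoopFor all i xs = (pvFirst pvCondFor xs i).map (fun q => pvApplyFor all q.1 q.2) := by
  intro xs
  induction xs with
  | nil => intro i; rfl
  | cons l rest ih =>
    intro i
    simp only [pvLoopFor, pvFirst]
    by_cases h : pvCondFor l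
    · simp [h]
    · simp [h, ih]

theorem pvLoopRet_eq (all : List (List Char)) : ∀ (xs : List (List Char)) (i : Nat),
    pvLoopRet all i xs = (pvFirst pvCondRet xs i).map (fun q => pvApplyRet all q.1 q.2) := by
  intro xs
  induction xs with
  | nil => intro i; rfl
  | cons l rest ih =>
    intro i
    simp only [pvLoopRet, pvFirst]
    by_cases h : pvCondRet l
    · simp [h]
    · simp [h, ih]

theorem pvScan_fst : ∀ (xs : List (List Char)) (i : Nat) (rh : Option (Nat × List Char)),
    (pvScan xs i none rh).1 = pvFirst pvCondFor xs i := by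
  intro xs
  induction xs with
  | nil => intro i rh; rfl
  | cons l rest ih =>
    intro i rh
    simp only [pvScan, pvFirst]
    by_cases h : pvCondFor l
    · simp [h]
    · simp [h, ih]

theorem pvScan_snd : ∀ (xs : List (List Char)) (i : Nat) (rh : Option (Nat × List Char)),
    pvFirst pvCondFor xs i = none →
    (pvScan xs i none rh).2 = rh.or (pvFirst pvCondRet xs i) := by
  intro xs
  induction xs with
  | nil => intro i rh _; cases rh <;> rfl
  | cons l rest ih =>
    intro i rh hnone
    simp only [pvFirst] at hnone
    by_cases h : pvCondFor l
    · simp [h] at hnone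
    · simp only [pvScan, h, Bool.false_eq_true, reduceIte]
      rw [ih _ _ (by simpa [h] using hnone)]
      cases rh with
      | some x => simp
      | none =>
        simp only [Option.isNone_none, Bool.true_and, Option.or, pvFirst]
        by_cases hr : pvCondRet l <;> simp [hr]

-- ===== VERDICT (by name: the statement is the Claim_ definition above) =====
theorem force_code_mutation_py_spec : Claim_equal_force_code_mutation_py := by
  intro code _
  unfold Spec_force_code_mutation_py force_code_mutation_py force_code_mutation_py_alt
  set lines := PySem.Chars.splitlines code.toList with hl
  by_cases hnil : lines = []
  · simp [hnil]
  · simp only [hnil, reduceIte]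
    rw [pvLoopFor_eq, pvLoopRet_eq, pvScan_fst]
    cases hf : pvFirst pvCondFor lines 0 with
    | some q => simp
    | none =>
      rw [pvScan_snd lines 0 none hf]
      cases hr : pvFirst pvCondRet lines 0 with
      | some q => simp [Option.or]
      | none => simp [Option.or]
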